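-- pv_equiv track=rewrite | github.com/oleg-yegorov/leetcode | n36_valid_sudoku.py | valid_digits
-- ===== SOURCE A (Python) =====
-- def valid_digits(block):
--     s = set()
--     for d in block:
--         if d == '.':
--             continue
--
--         if d in s:
--             return False
--         else:
--             s.add(d)
--     else:
--         return True
-- ===== SOURCE B (Python) =====
-- def valid_digits(block):
--     digits = sorted(d for d in block if d != '.')
--     return all(x != y for x, y in zip(digits, digits[1:]))
-- ===== Notes on version B (the rewrite author's own statement) =====
-- stated objective: alternative
-- what changed: Replaces A's set-based incremental membership scan with a sort-then-adjacent-scan: sort the non-dot entries so equal entries become neighbours, then check no two adjacent sorted entries are equal.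
import Mathlib
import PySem

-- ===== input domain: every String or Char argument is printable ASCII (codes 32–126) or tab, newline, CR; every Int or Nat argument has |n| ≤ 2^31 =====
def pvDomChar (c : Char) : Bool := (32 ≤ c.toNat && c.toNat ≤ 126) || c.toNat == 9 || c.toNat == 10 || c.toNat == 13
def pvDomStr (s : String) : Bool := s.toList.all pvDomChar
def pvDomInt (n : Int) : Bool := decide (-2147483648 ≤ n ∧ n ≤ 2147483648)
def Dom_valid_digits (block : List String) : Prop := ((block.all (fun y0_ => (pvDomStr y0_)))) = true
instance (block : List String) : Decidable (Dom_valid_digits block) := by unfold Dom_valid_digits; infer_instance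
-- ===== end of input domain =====

-- B replaces A's set-based incremental membership scan by a sort-then-adjacent-scan:
-- sort the non-dot entries so equal entries become neighbours, then check no two
-- adjacent sorted entries are equal (alternative decomposition, not claimed faster).

-- ===== PORT A =====
-- A's loop: carries the set s, returns False on the first repeated non-dot entry.
def validDigitsLoop (s : PySem.Set String) : List String → Bool
  | [] => true
  | d :: rest =>
    if d == "." then validDigitsLoop s rest
    else if PySem.Set.contains s d then false
    else validDigitsLoop (PySem.Set.add s d) rest

def valid_digits (block : List String) : Bool :=
  validDigitsLoop PySem.Set.empty block

-- ===== PORT B =====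
-- digits = sorted(d for d in block if d != '.');  digits[1:] = digits.tail (exact: slice from 1)
def valid_digits_alt (block : List String) : Bool :=
  let digits := PySem.List.sorted (block.filter (fun d => d != ".")) (fun x => x) false
  (digits.zip digits.tail).all (fun p => p.1 != p.2)

-- ===== PRECONDITION & SPEC =====
def Spec_valid_digits (block : List String) (out : Bool) : Prop := out = valid_digits_alt block
instance (block : List String) (out : Bool) : Decidable (Spec_valid_digits block out) := by unfold Spec_valid_digits; infer_instance

-- ===== CLAIM (what is proved, stated in full; the proofs are below) =====
def Claim_equal_valid_digits : Prop := ∀ (block : List String), Dom_valid_digits block → Spec_valid_digits block (valid_digits block)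

-- ===== LEMMAS AND PROOFS =====

-- A's loop returns true iff the non-dot entries are pairwise distinct and miss s.
lemma validDigitsLoop_iff (block : List String) : ∀ (s : PySem.Set String),
    (validDigitsLoop s block = true ↔
      (block.filter (fun d => d != ".")).Nodup ∧
        ∀ x ∈ block.filter (fun d => d != "."), x ∉ s) := by
  induction block with
  | nil => intro s; simp [validDigitsLoop]
  | cons d rest ih =>
    intro s
    by_cases hd : d = "."
    · subst hd
      simp only [validDigitsLoop, beq_self_eq_true, if_true]
      rw [ih s]
      simp
    · have hne : (d == ".") = false := by simp [hd]
      simp only [validDigitsLoop, hne, Bool.false_eq_true, if_false]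
      have hfil : (d :: rest).filter (fun x => x != ".") =
          d :: rest.filter (fun x => x != ".") := by
        simp [hd]
      rw [hfil]
      by_cases hds : d ∈ s
      · have hc : PySem.Set.contains s d = true := (PySem.Set.contains_iff s d).mpr hds
        simp only [hc, if_true]
        constructor
        · intro h; exact absurd h (by simp)
        · rintro ⟨_, hall⟩
          exact absurd hds (hall d (by simp))
      · have hc : PySem.Set.contains s d = false := by
          by_contra h
          exact hds ((PySem.Set.contains_iff s d).mp (by simpa using h))
        simp only [hc, Bool.false_eq_true, if_false]
        rw [ih (PySem.Set.add s d), PySem.Set.add_of_not_mem hds]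
        simp only [List.nodup_cons]
        constructor
        · rintro ⟨hnd, hall⟩
          refine ⟨⟨fun h => ?_, hnd⟩, ?_⟩
          · have := hall d h; simp at this
          · intro y hy
            rcases List.mem_cons.mp hy with rfl | hy'
            · exact hds
            · have := hall y hy'
              simp only [List.mem_append, List.mem_cons, List.not_mem_nil,
                or_false, not_or] at this
              exact this.1
        · rintro ⟨⟨hdm, hnd⟩, hall⟩
          refine ⟨hnd, fun y hy => ?_⟩
          simp only [List.mem_append, List.mem_cons, List.not_mem_nil, or_false, not_or]
          exact ⟨hall y (List.mem_cons_of_mem _ hy), by rintro rfl; exact hdm hy⟩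

-- the adjacent-pair scan over zip(l, l[1:]) is exactly Chain' (· ≠ ·)
lemma all_zip_tail_iff_chain' (l : List String) :
    ((l.zip l.tail).all (fun p => p.1 != p.2)) = true ↔ l.IsChain (· ≠ ·) := by
  induction l with
  | nil => simp
  | cons x t ih =>
    cases t with
    | nil => simp
    | cons y t' =>
      simp only [List.tail_cons, List.zip_cons_cons, List.all_cons, Bool.and_eq_true,
        List.isChain_cons_cons, bne_iff_ne, ne_eq]
      rw [← ih]
      simp

-- on a (≤)-sorted list, no equal adjacent pair is the same as Nodup
lemma sorted_chain_ne_iff_nodup (l : List String) (h : l.Pairwise (· ≤ ·)) :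
    l.IsChain (· ≠ ·) ↔ l.Nodup := by
  constructor
  · intro hc
    have hle : l.IsChain (· ≤ ·) := h.isChain
    have hlt : l.IsChain (· < ·) := by
      rw [List.isChain_iff_getElem] at hc hle ⊢
      intro i hi
      exact lt_of_le_of_ne (hle i hi) (hc i hi)
    have : l.Pairwise (· < ·) := List.isChain_iff_pairwise.mp hlt
    exact this.imp ne_of_lt
  · intro hnd
    exact List.Pairwise.isChain hnd

lemma valid_digits_alt_iff (block : List String) :
    valid_digits_alt block = true ↔ (block.filter (fun d => d != ".")).Nodup := by
  unfold valid_digits_alt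
  set digits := PySem.List.sorted (block.filter (fun d => d != ".")) (fun x => x) false with hdig
  have hperm : digits.Perm (block.filter (fun d => d != ".")) := PySem.List.sorted_perm _ _ _
  have hsorted : digits.Pairwise (· ≤ ·) := by
    have := PySem.List.sorted_pairwise (block.filter (fun d => d != ".")) (fun x => x)
    simpa [hdig] using this
  rw [all_zip_tail_iff_chain', sorted_chain_ne_iff_nodup digits hsorted]
  exact hperm.nodup_iff

-- ===== VERDICT (by name: the statement is the Claim_ definition above) =====
theorem valid_digits_spec : Claim_equal_valid_digits := by
  intro block _
  unfold Spec_valid_digits valid_digits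
  have hA := validDigitsLoop_iff block PySem.Set.empty
  have hB := valid_digits_alt_iff block
  rw [Bool.eq_iff_iff, hA, hB]
  simp [PySem.Set.empty]
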